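-- pv_equiv track=rewrite | github.com/ManuelLoaizaV/ine018-unmsm | tareas/2/24190110/Cadena buena/cadena_buena.py | convertir_a_buena
-- ===== SOURCE A (Python) =====
-- def convertir_a_buena(s):
--   caracteres=[]
--   for char in s:
--       if caracteres and caracteres[-1].islower() and caracteres[-1].upper()==char:
--         caracteres.pop()
--       else:
--         caracteres.append(char)
--   return "".join(caracteres)
-- ===== SOURCE B (Python) =====
-- def convertir_a_buena(s):
--     # Fixed-point reduction: repeatedly delete the leftmost adjacent
--     # lowercase/uppercase pair until no such pair remains.
--     while True:
--         for i in range(len(s) - 1):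
--             if s[i].islower() and s[i].upper() == s[i + 1]:
--                 s = s[:i] + s[i + 2:]
--                 break
--         else:
--             return s
-- ===== Notes on version B (the rewrite author's own statement) =====
-- stated objective: alternative
-- what changed: Replaces the single-pass stack (push each char, pop on a matching lowercase/uppercase top) by a fixed-point rewriting loop that repeatedly deletes the leftmost adjacent lowercase/uppercase pair until none remains; equality rests on the matched-pair reduction being confluent.
import Mathlib
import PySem

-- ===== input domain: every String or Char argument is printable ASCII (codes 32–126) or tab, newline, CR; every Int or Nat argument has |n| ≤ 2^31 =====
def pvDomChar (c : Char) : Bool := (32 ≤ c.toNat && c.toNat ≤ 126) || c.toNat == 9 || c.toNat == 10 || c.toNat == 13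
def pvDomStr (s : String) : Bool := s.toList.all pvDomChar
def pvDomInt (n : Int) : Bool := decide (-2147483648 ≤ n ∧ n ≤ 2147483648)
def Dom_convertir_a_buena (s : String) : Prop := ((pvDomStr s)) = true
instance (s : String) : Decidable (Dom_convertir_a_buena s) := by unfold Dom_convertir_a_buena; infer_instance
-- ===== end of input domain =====

-- B replaces A's one-pass stack by a fixed-point loop deleting the leftmost adjacent
-- lowercase/uppercase pair (objective: alternative algorithm; not faster).

-- ===== PORT A =====
-- the Python list `caracteres` is kept reversed (head = Python's caracteres[-1])
def pvStepA (st : List Char) (c : Char) : List Char :=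
  match st with
  | t :: rest =>
      if PySem.Chars.islower t && (PySem.Chars.upperChar t == c) then rest
      else c :: t :: rest
  | [] => [c]

def convertir_a_buena (s : String) : String :=
  String.mk ((s.toList.foldl pvStepA []).reverse)

-- ===== PORT B =====
-- scan for the leftmost adjacent reducible pair; delete it if found
def pvReduceOnce : List Char → Option (List Char)
  | [] => none
  | a :: rest =>
      match rest with
      | [] => none
      | b :: t =>
          if PySem.Chars.islower a && (PySem.Chars.upperChar a == b) then some t
          else (pvReduceOnce rest).map (a :: ·)

theorem pvReduceOnce_length : ∀ {cs cs' : List Char}, pvReduceOnce cs = some cs' →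
    cs'.length + 2 = cs.length := by
  intro cs
  induction cs with
  | nil => intro cs' h; simp [pvReduceOnce] at h
  | cons a rest ih =>
    intro cs' h
    match rest, h with
    | [], h => simp [pvReduceOnce] at h
    | b :: t, h =>
      simp only [pvReduceOnce] at h
      split at h
      · cases h; simp
      · simp only [Option.map_eq_some_iff] at h
        obtain ⟨c'', hc, rfl⟩ := h
        have := ih hc
        simp_all

-- fixed-point iteration of the leftmost-pair deletion
def pvFix (cs : List Char) : List Char :=
  match h : pvReduceOnce cs with
  | some cs' => pvFix cs'
  | none => cs
termination_by cs.length
decreasing_by have := pvReduceOnce_length h; omega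

def convertir_a_buena_alt (s : String) : String :=
  String.mk (pvFix s.toList)

-- ===== PRECONDITION & SPEC =====
def Spec_convertir_a_buena (s : String) (out : String) : Prop := out = convertir_a_buena_alt s
instance (s : String) (out : String) : Decidable (Spec_convertir_a_buena s out) := by unfold Spec_convertir_a_buena; infer_instance

-- ===== CLAIM (what is proved, stated in full; the proofs are below) =====
def Claim_equal_convertir_a_buena : Prop := ∀ (s : String), Dom_convertir_a_buena s → Spec_convertir_a_buena s (convertir_a_buena s)

-- ===== LEMMAS AND PROOFS =====

theorem pvToNat_ofNat (n : Nat) (h : n.isValidChar) : (Char.ofNat n).toNat = n := by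
  unfold Char.ofNat
  split
  · rfl
  · simp_all

-- no character is both lowercase and the upperChar image of a lowercase character
theorem pvUpper_not_lower {a c : Char} (ha : PySem.Chars.islower a = true) :
    (PySem.Chars.islower c && (PySem.Chars.upperChar c == a)) = false := by
  by_cases hc : PySem.Chars.islower c = true
  · simp only [hc, Bool.true_and, beq_eq_false_iff_ne, ne_eq]
    intro he
    simp only [PySem.Chars.islower, Bool.and_eq_true, decide_eq_true_eq, Char.le_def] at hc ha
    have hcn : 97 ≤ c.toNat ∧ c.toNat ≤ 122 := ⟨hc.1, hc.2⟩
    have han : 97 ≤ a.toNat ∧ a.toNat ≤ 122 := ⟨ha.1, ha.2⟩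
    have hu : (PySem.Chars.upperChar c).toNat = c.toNat - 32 := by
      simp only [PySem.Chars.upperChar, PySem.Chars.islower, Char.le_def]
      rw [if_pos (by simp only [Bool.and_eq_true, decide_eq_true_eq]; exact hc)]
      exact pvToNat_ofNat _ (by unfold Nat.isValidChar; omega)
    have := congrArg Char.toNat he
    rw [hu] at this
    omega
  · simp only [Bool.not_eq_true] at hc
    simp [hc]

-- deleting the leftmost reducible pair does not change A's stack run
theorem pvFold_reduce : ∀ {cs cs' : List Char} (st : List Char),
    pvReduceOnce cs = some cs' →
    cs.foldl pvStepA st = cs'.foldl pvStepA st := by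
  intro cs
  induction cs with
  | nil => intro cs' st h; simp [pvReduceOnce] at h
  | cons a rest ih =>
    intro cs' st h
    match rest, h with
    | [], h => simp [pvReduceOnce] at h
    | b :: t, h =>
      simp only [pvReduceOnce] at h
      split at h
      · rename_i hab
        cases h
        have ha : PySem.Chars.islower a = true := by
          have := hab
          simp only [Bool.and_eq_true] at this
          exact this.1
        -- pushing a cannot pop (the top's upper image is never lowercase), then b pops a
        have h1 : pvStepA st a = a :: st := by
          match st with
          | [] => rfl
          | x :: xs =>
            show (if (PySem.Chars.islower x && (PySem.Chars.upperChar x == a)) = true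
                    then xs else a :: x :: xs) = a :: x :: xs
            rw [if_neg (by simp [pvUpper_not_lower ha])]
        have h2 : pvStepA (a :: st) b = st := by
          show (if (PySem.Chars.islower a && (PySem.Chars.upperChar a == b)) = true
                  then st else b :: a :: st) = st
          rw [if_pos hab]
        simp only [List.foldl_cons, h1, h2]
      · simp only [Option.map_eq_some_iff] at h
        obtain ⟨c'', hc, rfl⟩ := h
        have := ih (pvStepA st a) hc
        simp only [List.foldl_cons] at this ⊢
        exact this

-- with no reducible pair anywhere, A's stack only grows: the run is the reverse
theorem pvFold_id : ∀ (cs st : List Char),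
    pvReduceOnce cs = none →
    (∀ x ∈ st.head?, ∀ y ∈ cs.head?,
        (PySem.Chars.islower x && (PySem.Chars.upperChar x == y)) = false) →
    cs.foldl pvStepA st = cs.reverse ++ st := by
  intro cs
  induction cs with
  | nil => intro st _ _; simp
  | cons a rest ih =>
    intro st h hb
    have hstep : pvStepA st a = a :: st := by
      match st with
      | [] => rfl
      | x :: xs =>
        show (if (PySem.Chars.islower x && (PySem.Chars.upperChar x == a)) = true
                then xs else a :: x :: xs) = a :: x :: xs
        rw [if_neg (by simp [hb x (by simp) a (by simp)])]
    match rest, h with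
    | [], _ => simp [List.foldl, hstep]
    | b :: t, h =>
      simp only [pvReduceOnce] at h
      split at h
      · exact absurd h (by simp)
      · rename_i hab
        simp only [Option.map_eq_none_iff] at h
        have := ih (a :: st) h (by
          intro x hx y hy
          simp only [List.head?_cons, Option.mem_def, Option.some_inj] at hx hy
          subst hx; subst hy
          simpa using hab)
        simp only [List.foldl_cons, hstep, this]
        simp

-- A's run computes B's fixed point
theorem pvRun_eq_fix : ∀ (cs : List Char),
    (cs.foldl pvStepA []).reverse = pvFix cs := by
  intro cs
  fun_induction pvFix cs with
  | case1 cs cs' h ih =>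
    rw [pvFold_reduce [] h, ih]
  | case2 cs h =>
    rw [pvFold_id cs [] h (by simp)]
    simp

-- ===== VERDICT (by name: the statement is the Claim_ definition above) =====
theorem convertir_a_buena_spec : Claim_equal_convertir_a_buena := by
  intro s _
  unfold Spec_convertir_a_buena convertir_a_buena convertir_a_buena_alt
  rw [pvRun_eq_fix]
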